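-- pv_equiv track=rewrite | github.com/nhyldmar/HexCambridge | Regexer.py | convert_to_regex
-- ===== SOURCE A (Python) =====
-- def convert_to_regex(word):
--     regex_out = "/\\w*" # This might be too many '\'s but it makes the Python IDE happy.
--
--     for index, character in enumerate(word):
--         # This will behave poorly if KKK (say) is in the list.
--         # Skip if character is same as previous
--         if index != 0:
--             if character == word[index - 1]:
--                 continue
--
--         # Append any variation of at least one of the character to the regex
--         if character == 'f':
--             regex_out += "(?:f+|p+h+)"
--         elif character == 'c' or character == 'k':
--             regex_out += "[ck]+"
--         else:
--             regex_out += character + "+"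
--
--
--     return regex_out + "e*s*/i" # Plurals & case insensitive. Might need to be /gi
-- ===== SOURCE B (Python) =====
-- PIECES = {'f': "(?:f+|p+h+)", 'c': "[ck]+", 'k': "[ck]+"}
--
-- def convert_to_regex(word):
--     out = ["/\\w*"]
--     w = word
--     while w:
--         c = w[0]
--         out.append(PIECES.get(c, c + "+"))
--         w = w.lstrip(c)
--     out.append("e*s*/i")
--     return "".join(out)
-- ===== Notes on version B (the rewrite author's own statement) =====
-- stated objective: alternative
-- what changed: B replaces A's indexed look-behind loop (compare each char with word[index-1] and skip) with a run-consuming while loop that strips each maximal run with str.lstrip and maps the run's character through a PIECES lookup table instead of A's if/elif branch chain, joining collected pieces at the end.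
import Mathlib
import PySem

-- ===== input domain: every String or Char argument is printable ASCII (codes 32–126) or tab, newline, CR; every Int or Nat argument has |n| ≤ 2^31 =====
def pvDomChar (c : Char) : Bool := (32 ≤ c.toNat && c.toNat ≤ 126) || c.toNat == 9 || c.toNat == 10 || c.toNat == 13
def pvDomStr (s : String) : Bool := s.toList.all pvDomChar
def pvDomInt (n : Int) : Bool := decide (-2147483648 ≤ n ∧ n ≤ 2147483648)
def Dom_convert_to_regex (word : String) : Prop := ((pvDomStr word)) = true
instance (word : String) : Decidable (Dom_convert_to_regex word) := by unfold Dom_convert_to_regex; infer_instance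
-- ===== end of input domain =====

-- B replaces A's indexed look-behind loop and if/elif chain with a run-consuming
-- loop (strip each maximal run with lstrip) and a PIECES lookup table; same output.

-- ===== PORT A =====
-- Literal port of A: foldl over enumerate(word); skip when index ≠ 0 and the
-- character equals word[index - 1]; otherwise append the branch's piece.
def convert_to_regex (word : String) : String :=
  String.mk (((PySem.List.enumerate word.toList 0).foldl (fun acc ic =>
      if ic.1 ≠ 0 ∧ PySem.List.pyGet? word.toList (ic.1 - 1) = some ic.2 then acc
      else acc ++ (if ic.2 = 'f' then "(?:f+|p+h+)".toList
                   else if ic.2 = 'c' ∨ ic.2 = 'k' then "[ck]+".toList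
                   else [ic.2, '+'])) "/\\w*".toList) ++ "e*s*/i".toList)

-- ===== PORT B =====
-- the module-level PIECES table
def pvPieces : PySem.Dict Char (List Char) :=
  PySem.Dict.ofList [('f', "(?:f+|p+h+)".toList),
                     ('c', "[ck]+".toList),
                     ('k', "[ck]+".toList)]

-- the while loop: look up w[0] in PIECES (default c + "+"), then w = w.lstrip(c)
def pvAltLoop : List Char → List (List Char)
  | [] => []
  | c :: rest => PySem.Dict.getD pvPieces c [c, '+'] :: pvAltLoop (rest.dropWhile (· == c))
termination_by l => l.length
decreasing_by
  have := List.length_dropWhile_le (· == c) rest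
  simp; omega

-- "".join(out) with out = ["/\\w*"] ++ loop pieces ++ ["e*s*/i"]
def convert_to_regex_alt (word : String) : String :=
  String.mk (("/\\w*".toList :: (pvAltLoop word.toList ++ ["e*s*/i".toList])).flatten)

-- ===== PRECONDITION & SPEC =====
def Spec_convert_to_regex (word : String) (out : String) : Prop := out = convert_to_regex_alt word
instance (word : String) (out : String) : Decidable (Spec_convert_to_regex word out) := by unfold Spec_convert_to_regex; infer_instance

-- ===== CLAIM (what is proved, stated in full; the proofs are below) =====
def Claim_equal_convert_to_regex : Prop := ∀ (word : String), Dom_convert_to_regex word → Spec_convert_to_regex word (convert_to_regex word)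

-- ===== LEMMAS AND PROOFS =====

-- A's branch chain as a function
def pvPiece (c : Char) : List Char :=
  if c = 'f' then "(?:f+|p+h+)".toList
  else if c = 'c' ∨ c = 'k' then "[ck]+".toList
  else [c, '+']

-- B's table lookup agrees with A's branch chain
theorem pvPieces_getD (c : Char) : PySem.Dict.getD pvPieces c [c, '+'] = pvPiece c := by
  by_cases hf : c = 'f'
  · subst hf; decide
  · by_cases hc : c = 'c'
    · subst hc; decide
    · by_cases hk : c = 'k'
      · subst hk; decide
      · have hf' : ('f' == c) = false := by simp [Ne.symm hf]
        have hc' : ('c' == c) = false := by simp [Ne.symm hc]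
        have hk' : ('k' == c) = false := by simp [Ne.symm hk]
        simp [pvPieces, PySem.Dict.ofList, PySem.Dict.getD, PySem.Dict.get?,
              pvPiece, hf, hc, hk, PySem.Dict.update, PySem.Dict.empty,
              PySem.Dict.insert, List.find?, hf', hc', hk']

-- Proof-side recursion: the pieces A's loop emits, carrying the previous character.
def pvSpecL : Option Char → List Char → List Char
  | _, [] => []
  | prev, c :: rest => (if prev = some c then [] else pvPiece c) ++ pvSpecL (some c) rest

theorem pvSpecL_some (l : List Char) : ∀ p : Char,
    pvSpecL (some p) l = (pvAltLoop (l.dropWhile (· == p))).flatten := by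
  induction l with
  | nil => intro p; simp [pvSpecL, pvAltLoop]
  | cons c rest ih =>
    intro p
    by_cases h : c = p
    · subst h
      simp [pvSpecL, List.dropWhile, ih c]
    · have hb : (c == p) = false := by simp [h]
      simp [pvSpecL, List.dropWhile, hb, Option.some.injEq, Ne.symm h, pvAltLoop,
            pvPieces_getD, ih c]

theorem pvSpecL_none (l : List Char) :
    pvSpecL none l = (pvAltLoop l).flatten := by
  cases l with
  | nil => simp [pvSpecL, pvAltLoop]
  | cons c rest => simp [pvSpecL, pvAltLoop, pvSpecL_some, pvPieces_getD]

-- the previous-character lookup A performs at index k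
def pvPrevAt (chars : List Char) (k : Nat) : Option Char :=
  if k = 0 then none else chars[k - 1]?

theorem pvLoopA (chars : List Char) : ∀ (l : List Char) (k : Nat) (acc : List Char),
    chars.drop k = l →
    (PySem.List.enumerate l (k : Int)).foldl (fun acc ic =>
      if ic.1 ≠ 0 ∧ PySem.List.pyGet? chars (ic.1 - 1) = some ic.2 then acc
      else acc ++ (if ic.2 = 'f' then "(?:f+|p+h+)".toList
                   else if ic.2 = 'c' ∨ ic.2 = 'k' then "[ck]+".toList
                   else [ic.2, '+'])) acc
      = acc ++ pvSpecL (pvPrevAt chars k) l := by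
  intro l
  induction l with
  | nil => intro k acc _; simp [PySem.List.enumerate_nil, pvSpecL]
  | cons c rest ih =>
    intro k acc hdrop
    have hk : k < chars.length := by
      by_contra h
      simp [List.drop_eq_nil_of_le (Nat.le_of_not_lt h)] at hdrop
    have hck : chars[k]? = some c := by
      have h0 : (chars.drop k)[0]? = some c := by simp [hdrop]
      rw [List.getElem?_drop] at h0
      simpa using h0
    have hrest : chars.drop (k + 1) = rest := by
      have h1 : List.drop 1 (List.drop k chars) = rest := by rw [hdrop]; rfl
      rwa [List.drop_drop] at h1
    have hcond : ((k : Int) ≠ 0 ∧ PySem.List.pyGet? chars ((k : Int) - 1) = some c)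
        ↔ pvPrevAt chars k = some c := by
      cases k with
      | zero => simp [pvPrevAt]
      | succ j =>
        have hcast : ((j + 1 : Nat) : Int) - 1 = ((j : Nat) : Int) := by push_cast; ring
        constructor
        · rintro ⟨-, h⟩
          rw [hcast, PySem.List.pyGet?_natCast] at h
          simpa [pvPrevAt] using h
        · intro h
          refine ⟨by positivity, ?_⟩
          rw [hcast, PySem.List.pyGet?_natCast]
          simpa [pvPrevAt] using h
    rw [PySem.List.enumerate_cons]
    simp only [List.foldl_cons]
    have hnext : pvPrevAt chars (k + 1) = some c := by
      simp [pvPrevAt, hck]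
    have hkc : ((k : Int) + 1) = ((k + 1 : Nat) : Int) := by push_cast; ring
    by_cases hsk : pvPrevAt chars k = some c
    · rw [if_pos (hcond.mpr hsk), hkc, ih (k + 1) acc hrest, hnext, pvSpecL]
      simp [hsk]
    · rw [if_neg (fun h => hsk (hcond.mp h)), hkc, ih (k + 1) _ hrest, hnext, pvSpecL]
      simp [hsk, pvPiece, List.append_assoc]

-- ===== VERDICT (by name: the statement is the Claim_ definition above) =====
theorem convert_to_regex_spec : Claim_equal_convert_to_regex := by
  intro word _
  unfold Spec_convert_to_regex convert_to_regex convert_to_regex_alt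
  have h := pvLoopA word.toList word.toList 0 "/\\w*".toList (by simp)
  simp only [Int.natCast_zero] at h
  rw [h, pvPrevAt, if_pos rfl, pvSpecL_none]
  simp
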